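-- pv_equiv track=rewrite | github.com/pfeuh/atasmPrecompiler | precompile.py | commentLine
-- ===== SOURCE A (Python) =====
-- COMMENT_TAG = ";"
--
-- EMPTY_STR = ""
--
-- CHAR_SPACE =' '
--
-- def commentLine(text):
--     if text.startswith(CHAR_SPACE):
--         return "%s %s"%(COMMENT_TAG, text)
--     else:
--         # don't comment all the line if it begins with a label
--         found = False
--         ret_text = EMPTY_STR
--         for car in text:
--             if found:
--                 ret_text += car
--             else:
--                 if car != CHAR_SPACE:
--                     ret_text += car
--                 else:
--                     ret_text +=" ; "
--                     found = True
--         return ret_text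
-- ===== SOURCE B (Python) =====
-- def commentLine(text):
--     if text.startswith(' '):
--         return "; " + text
--     head, sep, tail = text.partition(' ')
--     if sep:
--         return head + " ; " + tail
--     return text
-- ===== Notes on version B (the rewrite author's own statement) =====
-- stated objective: simpler
-- what changed: Replaces the char-by-char accumulation loop with flag state by a single partition at the first space and one concatenation.
import Mathlib
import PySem

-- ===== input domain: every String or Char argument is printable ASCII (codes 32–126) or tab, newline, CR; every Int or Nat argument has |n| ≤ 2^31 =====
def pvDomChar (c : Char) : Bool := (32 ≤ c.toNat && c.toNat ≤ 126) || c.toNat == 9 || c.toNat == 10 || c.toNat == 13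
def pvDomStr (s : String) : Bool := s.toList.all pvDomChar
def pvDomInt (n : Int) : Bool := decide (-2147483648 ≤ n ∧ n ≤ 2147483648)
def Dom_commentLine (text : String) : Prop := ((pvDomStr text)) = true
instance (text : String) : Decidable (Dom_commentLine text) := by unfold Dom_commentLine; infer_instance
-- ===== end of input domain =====

-- B replaces A's char-by-char loop with a single partition at the first space; objective: simpler.

-- ===== PORT A =====
-- loop body: accumulate chars; on the first space insert " ; " and set the flag
def commentLineStep (st : Bool × List Char) (car : Char) : Bool × List Char :=
  if st.1 then (st.1, st.2 ++ [car])
  else if car ≠ ' ' then (st.1, st.2 ++ [car])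
  else (true, st.2 ++ (" ; ".toList))

def commentLine (text : String) : String :=
  if text.startsWith " " then "; " ++ text
  else
    let st := text.toList.foldl commentLineStep (false, [])
    String.ofList st.2

-- ===== PORT B =====
def commentLine_alt (text : String) : String :=
  if text.startsWith " " then "; " ++ text
  else
    let l := text.toList
    let head := l.takeWhile (· ≠ ' ')
    match l.dropWhile (· ≠ ' ') with
    | [] => text
    | _ :: tail => String.ofList (head ++ " ; ".toList ++ tail)

-- ===== PRECONDITION & SPEC =====
def Spec_commentLine (text : String) (out : String) : Prop := out = commentLine_alt text
instance (text : String) (out : String) : Decidable (Spec_commentLine text out) := by unfold Spec_commentLine; infer_instance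

-- ===== CLAIM (what is proved, stated in full; the proofs are below) =====
def Claim_equal_commentLine : Prop := ∀ (text : String), Dom_commentLine text → Spec_commentLine text (commentLine text)

-- ===== LEMMAS AND PROOFS =====
theorem foldl_step_true (l : List Char) (acc : List Char) :
    l.foldl commentLineStep (true, acc) = (true, acc ++ l) := by
  induction l generalizing acc with
  | nil => simp
  | cons c cs ih => simp [commentLineStep, ih]

theorem foldl_step_false (l : List Char) (acc : List Char) :
    l.foldl commentLineStep (false, acc) =
      match l.dropWhile (· ≠ ' ') with
      | [] => (false, acc ++ l)
      | _ :: tail => (true, acc ++ l.takeWhile (· ≠ ' ') ++ " ; ".toList ++ tail) := by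
  induction l generalizing acc with
  | nil => simp
  | cons c cs ih =>
    by_cases hc : c = ' '
    · subst hc
      simp [commentLineStep, foldl_step_true]
    · rw [List.foldl_cons]
      have hstep : commentLineStep (false, acc) c = (false, acc ++ [c]) := by
        simp [commentLineStep, hc]
      rw [hstep, ih]
      simp only [List.dropWhile_cons, List.takeWhile_cons, hc, decide_not, decide_false,
        Bool.not_false, if_true]
      cases cs.dropWhile (· ≠ ' ') <;> simp

-- ===== VERDICT (by name: the statement is the Claim_ definition above) =====
theorem commentLine_spec : Claim_equal_commentLine := by
  intro text _
  unfold Spec_commentLine commentLine commentLine_alt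
  by_cases h : text.startsWith " "
  · simp [h]
  · simp only [h, Bool.false_eq_true, if_false, foldl_step_false]
    cases hd : text.toList.dropWhile (· ≠ ' ') with
    | nil => simp
    | cons x tl => simp
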